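-- pv_equiv track=rewrite | github.com/AlexKitipov/AGC_256_Fractal_container_v.5 | archive/AGC_256_Fractal_container_v.5.py | select_best_variant_with_checksum
-- ===== SOURCE A (Python) =====
-- nuc_to_int = {
--     'C': 0,
--     'T': 1,
--     'A': 2,
--     'G': 3
-- }
--
-- int_to_nuc = {v: k for k, v in nuc_to_int.items()}
--
-- def calculate_genetic_checksum(nucleotide_sequence):
--     """
--     Calculates a genetic checksum for a given nucleotide sequence.
--     The checksum is based on the sum of 2-bit integer representations
--     of nucleotides, modulo 16, encoded as two nucleotides.
--     """
--     total_sum = 0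
--     for nuc in nucleotide_sequence:
--         total_sum += nuc_to_int.get(nuc, 0)  # Use .get with default 0 for safety
--
--     checksum_value = total_sum % 16  # Checksum is a value between 0 and 15 (4-bit value)
--
--     # Convert checksum value to 4-bit binary string (e.g., 0 -> "0000", 15 -> "1111")
--     checksum_binary = f"{checksum_value:04b}"
--
--     # Convert 4-bit binary string to two nucleotides using int_to_nuc
--     checksum_nuc1_int = int(checksum_binary[0:2], 2)
--     checksum_nuc2_int = int(checksum_binary[2:4], 2)
--
--     checksum_nuc1 = int_to_nuc[checksum_nuc1_int]
--     checksum_nuc2 = int_to_nuc[checksum_nuc2_int]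
--
--     return [checksum_nuc1, checksum_nuc2]
--
-- def verify_genetic_checksum(seq):
--     """
--     Verifies the genetic checksum of a sequence.
--     Assumes the last two nucleotides are the checksum.
--     """
--     if len(seq) < 2:
--         return False
--     data = seq[:-2]        # The original data part
--     checksum = seq[-2:]    # The provided checksum part
--     expected = calculate_genetic_checksum(data)
--     return checksum == expected
--
-- def select_best_variant_with_checksum(candidate_variants, original_sequence_prefix, original_sequence_suffix):
--     """
--     Selects the best candidate variant based on the validity of the genetic checksum
--     of the full reconstructed sequence.
--
--     Args:
--         candidate_variants (list): A list of nucleotide sequences (lists of chars),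
--                                    each representing a potential correction for a segment.
--         original_sequence_prefix (list): The part of the original sequence before the corrupted segment.
--         original_sequence_suffix (list): The part of the original sequence after the corrupted segment.
--                                    This *must* include the original 2-nucleotide checksum if one was present.
--
--     Returns:
--         list or None: The nucleotide sequence of the best variant that results in a valid checksum,
--                       or None if no variant yields a valid checksum.
--     """
--     best_variant = None
--
--     for candidate_segment in candidate_variants:
--         # Construct the full reconstructed sequence by integrating the candidate segment
--         full_reconstructed_sequence = original_sequence_prefix + candidate_segment + original_sequence_suffix
--
--         # Verify the genetic checksum of the full sequence
--         # The `verify_genetic_checksum` function assumes the checksum is the last two nucleotides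
--         # of the *entire* sequence passed to it.
--         # Therefore, `original_sequence_suffix` must include these two checksum nucleotides
--         # if a checksum was originally present for the full sequence.
--         if len(full_reconstructed_sequence) >= 2:
--             is_checksum_valid = verify_genetic_checksum(full_reconstructed_sequence)
--
--             if is_checksum_valid:
--                 # If a valid checksum is found, this is the best variant, return immediately.
--                 best_variant = candidate_segment
--                 return best_variant
--
--     # If no variant resulted in a valid checksum, return None
--     return None
-- ===== SOURCE B (Python) =====
-- def select_best_variant_with_checksum(candidate_variants, original_sequence_prefix, original_sequence_suffix):
--     # One-pass per candidate: the prefix/suffix sums are computed once, each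
--     # candidate only contributes its own segment sum; the two checksum slots
--     # (last two elements of the reconstructed sequence) are located without
--     # ever building the full sequence.
--     val = {'C': 0, 'T': 1, 'A': 2, 'G': 3}
--     enc = ['C', 'T', 'A', 'G']
--     pre_sum = sum(val.get(x, 0) for x in original_sequence_prefix)
--     suf_sum = sum(val.get(x, 0) for x in original_sequence_suffix)
--     lp = len(original_sequence_prefix)
--     ls = len(original_sequence_suffix)
--     pref_tail = original_sequence_prefix[-2:]
--     for seg in candidate_variants:
--         if lp + len(seg) + ls < 2:
--             continue
--         if ls >= 2:
--             t0, t1 = original_sequence_suffix[-2], original_sequence_suffix[-1]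
--         else:
--             combo = pref_tail + seg + original_sequence_suffix
--             t0, t1 = combo[-2], combo[-1]
--         seg_sum = sum(val.get(x, 0) for x in seg)
--         v = (pre_sum + seg_sum + suf_sum - val.get(t0, 0) - val.get(t1, 0)) % 16
--         if t0 == enc[v // 4] and t1 == enc[v % 4]:
--             return seg
--     return None
-- ===== Notes on version B (the rewrite author's own statement) =====
-- stated objective: faster
-- what changed: Instead of rebuilding the full sequence and re-summing prefix+segment+suffix for every candidate, B computes the prefix and suffix nucleotide-value sums once, sums only each candidate's own segment, and tests the two checksum slots (the last two elements) directly at the prefix/segment/suffix boundary without constructing the full sequence.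
import Mathlib
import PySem

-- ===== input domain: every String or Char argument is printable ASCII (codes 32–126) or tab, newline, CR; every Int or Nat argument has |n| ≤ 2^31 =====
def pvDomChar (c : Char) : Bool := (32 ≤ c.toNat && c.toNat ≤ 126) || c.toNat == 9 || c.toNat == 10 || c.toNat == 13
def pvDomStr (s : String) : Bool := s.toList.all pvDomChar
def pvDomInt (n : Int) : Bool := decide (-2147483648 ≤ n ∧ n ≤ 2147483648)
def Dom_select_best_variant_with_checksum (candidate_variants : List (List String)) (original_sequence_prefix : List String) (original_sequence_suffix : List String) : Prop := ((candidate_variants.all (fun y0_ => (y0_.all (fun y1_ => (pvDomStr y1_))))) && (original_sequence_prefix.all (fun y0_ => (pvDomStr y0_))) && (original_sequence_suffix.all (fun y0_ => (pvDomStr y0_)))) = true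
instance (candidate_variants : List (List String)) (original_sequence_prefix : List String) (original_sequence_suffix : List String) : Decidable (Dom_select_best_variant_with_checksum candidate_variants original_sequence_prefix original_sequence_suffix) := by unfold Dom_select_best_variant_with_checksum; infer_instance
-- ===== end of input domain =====

-- B replaces A's per-candidate rebuild-and-rescan (prefix+segment+suffix summed from
-- scratch for every candidate) by prefix/suffix sums computed once, each candidate only
-- contributing its own segment sum, with the two checksum slots located directly.

-- ===== PORT A =====

-- nuc_to_int.get(nuc, 0): literal 4-key dict lookup with default 0
def pvNucToIntA (s : String) : Int :=
  if s = "C" then 0 else if s = "T" then 1 else if s = "A" then 2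
  else if s = "G" then 3 else 0

-- int_to_nuc[v]: dict lookup; every call site passes v ∈ {0,1,2,3}, so the final
-- branch (Python's KeyError) is never the value used.
def pvIntToNucA (v : Int) : String :=
  if v = 0 then "C" else if v = 1 then "T" else if v = 2 then "A" else "G"

def calculate_genetic_checksum (nucleotide_sequence : List String) : List String :=
  let total_sum := nucleotide_sequence.foldl (fun acc nuc => acc + pvNucToIntA nuc) 0
  let checksum_value := PySem.Int.mod total_sum 16
  -- f"{checksum_value:04b}" followed by int(binary[0:2], 2) / int(binary[2:4], 2):
  -- for 0 ≤ checksum_value < 16 these are exactly checksum_value // 4 and checksum_value % 4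
  let checksum_nuc1_int := PySem.Int.floordiv checksum_value 4
  let checksum_nuc2_int := PySem.Int.mod checksum_value 4
  [pvIntToNucA checksum_nuc1_int, pvIntToNucA checksum_nuc2_int]

def verify_genetic_checksum (seq : List String) : Bool :=
  if seq.length < 2 then false
  else
    let data := PySem.List.slice seq none (some (-2))
    let checksum := PySem.List.slice seq (some (-2)) none
    checksum == calculate_genetic_checksum data

def pvGoA (original_sequence_prefix original_sequence_suffix : List String) :
    List (List String) → Option (List String)
  | [] => none
  | candidate_segment :: rest =>
    let full := original_sequence_prefix ++ candidate_segment ++ original_sequence_suffix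
    if full.length ≥ 2 then
      if verify_genetic_checksum full then some candidate_segment
      else pvGoA original_sequence_prefix original_sequence_suffix rest
    else pvGoA original_sequence_prefix original_sequence_suffix rest

def select_best_variant_with_checksum (candidate_variants : List (List String)) (original_sequence_prefix : List String) (original_sequence_suffix : List String) : Option (List String) :=
  pvGoA original_sequence_prefix original_sequence_suffix candidate_variants

-- ===== PORT B =====

-- val.get(x, 0)
def pvValB (s : String) : Int :=
  if s = "C" then 0 else if s = "T" then 1 else if s = "A" then 2
  else if s = "G" then 3 else 0

-- enc[i]: list indexing; every call site passes i ∈ {0,1,2,3} (v//4 and v%4 with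
-- 0 ≤ v < 16), so the final branch (Python's IndexError) is never the value used.
def pvEncB (i : Int) : String :=
  if i = 0 then "C" else if i = 1 then "T" else if i = 2 then "A" else "G"

def pvGoB (preSum sufSum : Int) (lp ls : Nat) (prefTail suffix : List String) :
    List (List String) → Option (List String)
  | [] => none
  | seg :: rest =>
    if lp + seg.length + ls < 2 then pvGoB preSum sufSum lp ls prefTail suffix rest
    else
      -- t0, t1: the two checksum slots; the guard above makes both indexings
      -- in range, so the "" default of pyGetD is never the value used
      let t0t1 : String × String :=
        if ls ≥ 2 then
          (PySem.List.pyGetD suffix (-2) "", PySem.List.pyGetD suffix (-1) "")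
        else
          let combo := prefTail ++ seg ++ suffix
          (PySem.List.pyGetD combo (-2) "", PySem.List.pyGetD combo (-1) "")
      let t0 := t0t1.1
      let t1 := t0t1.2
      let segSum := seg.foldl (fun acc x => acc + pvValB x) 0
      let v := PySem.Int.mod (preSum + segSum + sufSum - pvValB t0 - pvValB t1) 16
      if t0 == pvEncB (PySem.Int.floordiv v 4) && t1 == pvEncB (PySem.Int.mod v 4) then
        some seg
      else pvGoB preSum sufSum lp ls prefTail suffix rest

def select_best_variant_with_checksum_alt (candidate_variants : List (List String)) (original_sequence_prefix : List String) (original_sequence_suffix : List String) : Option (List String) :=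
  let preSum := original_sequence_prefix.foldl (fun acc x => acc + pvValB x) 0
  let sufSum := original_sequence_suffix.foldl (fun acc x => acc + pvValB x) 0
  let prefTail := PySem.List.slice original_sequence_prefix (some (-2)) none
  pvGoB preSum sufSum original_sequence_prefix.length original_sequence_suffix.length
    prefTail original_sequence_suffix candidate_variants

-- ===== PRECONDITION & SPEC =====
def Spec_select_best_variant_with_checksum (candidate_variants : List (List String)) (original_sequence_prefix : List String) (original_sequence_suffix : List String) (out : Option (List String)) : Prop := out = select_best_variant_with_checksum_alt candidate_variants original_sequence_prefix original_sequence_suffix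
instance (candidate_variants : List (List String)) (original_sequence_prefix : List String) (original_sequence_suffix : List String) (out : Option (List String)) : Decidable (Spec_select_best_variant_with_checksum candidate_variants original_sequence_prefix original_sequence_suffix out) := by unfold Spec_select_best_variant_with_checksum; infer_instance

-- ===== CLAIM (what is proved, stated in full; the proofs are below) =====
def Claim_equal_select_best_variant_with_checksum : Prop := ∀ (candidate_variants : List (List String)) (original_sequence_prefix : List String) (original_sequence_suffix : List String), Dom_select_best_variant_with_checksum candidate_variants original_sequence_prefix original_sequence_suffix → Spec_select_best_variant_with_checksum candidate_variants original_sequence_prefix original_sequence_suffix (select_best_variant_with_checksum candidate_variants original_sequence_prefix original_sequence_suffix)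

-- ===== LEMMAS AND PROOFS =====

-- the two checksum slots B inspects, and B's per-candidate acceptance test
def pvT (p q seg : List String) : String × String :=
  if q.length ≥ 2 then
    (PySem.List.pyGetD q (-2) "", PySem.List.pyGetD q (-1) "")
  else
    let combo := PySem.List.slice p (some (-2)) none ++ seg ++ q
    (PySem.List.pyGetD combo (-2) "", PySem.List.pyGetD combo (-1) "")

def pvSum (l : List String) : Int := l.foldl (fun acc x => acc + pvValB x) 0

def pvCond (p q seg : List String) : Bool :=
  let t0 := (pvT p q seg).1
  let t1 := (pvT p q seg).2
  let v := PySem.Int.mod (pvSum p + pvSum seg + pvSum q - pvValB t0 - pvValB t1) 16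
  t0 == pvEncB (PySem.Int.floordiv v 4) && t1 == pvEncB (PySem.Int.mod v 4)

theorem pvSum_append (l1 l2 : List String) : pvSum (l1 ++ l2) = pvSum l1 + pvSum l2 := by
  simp [pvSum, PySem.List.foldl_add]

theorem pvSum_pair (a b : String) : pvSum [a, b] = pvValB a + pvValB b := by
  simp [pvSum]

theorem pvDecomp2 {α : Type} (l : List α) (h : 2 ≤ l.length) :
    ∃ init a b, l = init ++ [a, b] := by
  induction l with
  | nil => simp at h
  | cons x xs ih =>
    cases xs with
    | nil => simp at h
    | cons y ys =>
      cases ys with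
      | nil => exact ⟨[], x, y, rfl⟩
      | cons z t =>
        obtain ⟨i, a, b, hi⟩ := ih (by simp)
        exact ⟨x :: i, a, b, by simp [hi]⟩

theorem pvGet2_fst (l : List String) (a b : String) :
    PySem.List.pyGetD (l ++ [a, b]) (-2) "" = a := by
  rw [PySem.List.pyGetD_neg_ofNat (l ++ [a, b]) 2 "" (by omega) (by simp)]
  rw [List.getElem_append_right (by simp)]
  simp

theorem pvGet2_snd (l : List String) (a b : String) :
    PySem.List.pyGetD (l ++ [a, b]) (-1) "" = b := by
  have h : l ++ [a, b] = (l ++ [a]) ++ [b] := by simp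
  rw [h, PySem.List.pyGetD_neg_one_append_singleton]

theorem pvVerify_concat2 (init : List String) (a b : String) :
    verify_genetic_checksum (init ++ [a, b]) =
      ((a == pvEncB (PySem.Int.floordiv (PySem.Int.mod (pvSum init) 16) 4)) &&
       (b == pvEncB (PySem.Int.mod (PySem.Int.mod (pvSum init) 16) 4))) := by
  show (if (init ++ [a, b]).length < 2 then false
        else
          PySem.List.slice (init ++ [a, b]) (some (-2)) none ==
            calculate_genetic_checksum (PySem.List.slice (init ++ [a, b]) none (some (-2)))) = _
  rw [if_neg (by simp)]
  rw [PySem.List.slice_to_neg_ofNat _ 2 (by omega), PySem.List.slice_from_neg_ofNat _ 2 (by omega)]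
  have h1 : (init ++ [a, b]).length - 2 = init.length := by simp
  rw [h1, List.take_left, List.drop_left]
  show ([a, b] == [pvIntToNucA _, pvIntToNucA _]) = _
  simp [pvSum, pvIntToNucA, pvEncB, pvValB, pvNucToIntA]

theorem pvStep_eq (p q seg : List String)
    (h : 2 ≤ p.length + seg.length + q.length) :
    verify_genetic_checksum (p ++ seg ++ q) = pvCond p q seg := by
  by_cases hq : 2 ≤ q.length
  · obtain ⟨si, a, b, hsq⟩ := pvDecomp2 q hq
    have hfull : p ++ seg ++ q = (p ++ seg ++ si) ++ [a, b] := by simp [hsq]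
    have hv : pvSum p + pvSum seg + pvSum q - pvValB a - pvValB b
        = pvSum (p ++ seg ++ si) := by
      rw [hsq]; simp [pvSum_append, pvSum_pair]; ring
    have ht : pvT p q seg = (a, b) := by
      unfold pvT
      rw [if_pos (by simp [hsq])]
      rw [hsq, pvGet2_fst, pvGet2_snd]
    rw [hfull, pvVerify_concat2]
    unfold pvCond
    rw [ht]
    simp only [hv]
  · replace hq := Nat.lt_of_not_le hq
    have hpt : PySem.List.slice p (some (-2)) none = p.drop (p.length - 2) :=
      PySem.List.slice_from_neg_ofNat p 2 (by omega)
    have hclen : 2 ≤ (p.drop (p.length - 2) ++ seg ++ q).length := by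
      simp; omega
    obtain ⟨ci, a, b, hc⟩ := pvDecomp2 _ hclen
    have hfull : p ++ seg ++ q = (p.take (p.length - 2) ++ ci) ++ [a, b] := by
      conv_lhs => rw [← List.take_append_drop (p.length - 2) p]
      rw [List.append_assoc, List.append_assoc, ← List.append_assoc (p.drop (p.length - 2)), hc]
      simp
    have hv : pvSum p + pvSum seg + pvSum q - pvValB a - pvValB b
        = pvSum (p.take (p.length - 2) ++ ci) := by
      conv_lhs => rw [← List.take_append_drop (p.length - 2) p]
      have hdrop : pvSum (p.drop (p.length - 2)) + pvSum seg + pvSum q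
          = pvSum ci + pvValB a + pvValB b := by
        have := congrArg pvSum hc
        rw [pvSum_append, pvSum_append, pvSum_append, pvSum_pair] at this
        linarith [this]
      rw [pvSum_append]
      rw [pvSum_append]
      linarith [hdrop]
    have ht : pvT p q seg = (a, b) := by
      unfold pvT
      rw [if_neg (by omega)]
      show (PySem.List.pyGetD (PySem.List.slice p (some (-2)) none ++ seg ++ q) (-2) "",
            PySem.List.pyGetD (PySem.List.slice p (some (-2)) none ++ seg ++ q) (-1) "") = _
      rw [hpt, hc, pvGet2_fst, pvGet2_snd]
    rw [hfull, pvVerify_concat2]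
    unfold pvCond
    rw [ht]
    simp only [hv]

theorem pvGo_eq (p q : List String) (cv : List (List String)) :
    pvGoA p q cv =
      pvGoB (pvSum p) (pvSum q) p.length q.length
        (PySem.List.slice p (some (-2)) none) q cv := by
  induction cv with
  | nil => rfl
  | cons seg rest ih =>
    show (if (p ++ seg ++ q).length ≥ 2 then
            if verify_genetic_checksum (p ++ seg ++ q) then some seg else pvGoA p q rest
          else pvGoA p q rest)
        = (if p.length + seg.length + q.length < 2 then
             pvGoB (pvSum p) (pvSum q) p.length q.length
               (PySem.List.slice p (some (-2)) none) q rest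
           else if pvCond p q seg then some seg
           else pvGoB (pvSum p) (pvSum q) p.length q.length
               (PySem.List.slice p (some (-2)) none) q rest)
    by_cases hn : 2 ≤ p.length + seg.length + q.length
    · rw [if_pos (show (p ++ seg ++ q).length ≥ 2 by simp only [List.length_append]; omega),
          pvStep_eq p q seg hn,
          if_neg (show ¬ (p.length + seg.length + q.length < 2) by omega), ih]
    · rw [if_neg (show ¬ (p ++ seg ++ q).length ≥ 2 by simp only [List.length_append]; omega),
          if_pos (by omega), ih]

-- ===== VERDICT (by name: the statement is the Claim_ definition above) =====
theorem select_best_variant_with_checksum_spec : Claim_equal_select_best_variant_with_checksum := by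
  intro cv p q _
  unfold Spec_select_best_variant_with_checksum
  show pvGoA p q cv = _
  rw [pvGo_eq]
  rfl
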